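-- pv_equiv track=rewrite | github.com/reail-iitd/goalnet | data_clean/src/inducer.py | check_h_sibof_l
-- ===== SOURCE A (Python) =====
-- def check_h_sibof_l(h_id, l_id):
--     if len(h_id)+1 != len(l_id):
--         return False
--     temp = l_id[:]
--     try:
--         for v in h_id:
--             temp.remove(v)
--         return True
--     except:
--         return False
-- ===== SOURCE B (Python) =====
-- def check_h_sibof_l(h_id, l_id):
--     if len(h_id) + 1 != len(l_id):
--         return False
--     a = sorted(h_id)
--     b = sorted(l_id)
--     j = 0
--     for x in a:
--         while j < len(b) and b[j] < x:
--             j += 1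
--         if j >= len(b) or b[j] != x:
--             return False
--         j += 1
--     return True
-- ===== Notes on version B (the rewrite author's own statement) =====
-- stated objective: alternative
-- what changed: Sorts both lists once and checks sorted(h_id) is a subsequence of sorted(l_id) with a two-pointer merge walk, replacing A's repeated list.remove scans inside try/except.
import Mathlib
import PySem

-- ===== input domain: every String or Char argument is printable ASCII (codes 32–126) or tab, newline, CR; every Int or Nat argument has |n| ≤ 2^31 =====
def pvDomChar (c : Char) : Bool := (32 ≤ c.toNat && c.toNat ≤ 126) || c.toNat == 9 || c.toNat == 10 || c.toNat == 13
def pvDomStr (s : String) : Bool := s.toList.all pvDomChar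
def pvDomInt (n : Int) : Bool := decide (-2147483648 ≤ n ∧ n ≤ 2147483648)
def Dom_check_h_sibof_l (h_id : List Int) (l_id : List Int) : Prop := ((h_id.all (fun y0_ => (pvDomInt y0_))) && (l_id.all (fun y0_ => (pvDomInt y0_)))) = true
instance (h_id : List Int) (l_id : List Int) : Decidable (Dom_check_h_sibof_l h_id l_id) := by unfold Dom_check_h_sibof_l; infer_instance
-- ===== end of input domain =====

-- B sorts both lists once and checks sorted(h_id) is a subsequence of sorted(l_id) with a two-pointer
-- merge walk, instead of A's repeated list.remove scans inside try/except.


-- ===== PORT A =====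
-- the 'for v in h_id: temp.remove(v)' loop; remove? = none is the ValueError caught by 'except'
def pvRemoveLoop (h : List Int) (temp : List Int) : Bool :=
  match h with
  | [] => true
  | v :: rest =>
    match PySem.List.remove? temp v with
    | none => false
    | some t => pvRemoveLoop rest t

def check_h_sibof_l (h_id : List Int) (l_id : List Int) : Bool :=
  if h_id.length + 1 ≠ l_id.length then false
  -- temp = l_id[:] is a fresh copy; as a value it is l_id itself
  else pvRemoveLoop h_id l_id

-- ===== PORT B =====
-- the 'for x in a' loop over sorted h_id; the inner 'while j < len(b) and b[j] < x: j += 1'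
-- advances the pointer past the strictly smaller prefix of the remaining suffix of b (dropWhile),
-- then 'if j >= len(b) or b[j] != x: return False' checks the element under the pointer
def pvMergeLoop (a : List Int) (b : List Int) : Bool :=
  match a with
  | [] => true
  | x :: a' =>
    match b.dropWhile (fun y => decide (y < x)) with
    | [] => false                       -- j >= len(b)
    | y :: rest => if y ≠ x then false else pvMergeLoop a' rest   -- b[j] != x; then j += 1

def check_h_sibof_l_alt (h_id : List Int) (l_id : List Int) : Bool :=
  if h_id.length + 1 ≠ l_id.length then false
  else pvMergeLoop (PySem.List.sorted h_id (fun x => x) false)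
                   (PySem.List.sorted l_id (fun x => x) false)

-- ===== PRECONDITION & SPEC =====
def Spec_check_h_sibof_l (h_id : List Int) (l_id : List Int) (out : Bool) : Prop := out = check_h_sibof_l_alt h_id l_id
instance (h_id : List Int) (l_id : List Int) (out : Bool) : Decidable (Spec_check_h_sibof_l h_id l_id out) := by unfold Spec_check_h_sibof_l; infer_instance

-- ===== CLAIM (what is proved, stated in full; the proofs are below) =====
def Claim_equal_check_h_sibof_l : Prop := ∀ (h_id : List Int) (l_id : List Int), Dom_check_h_sibof_l h_id l_id → Spec_check_h_sibof_l h_id l_id (check_h_sibof_l h_id l_id)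

-- ===== LEMMAS AND PROOFS =====

-- A's remove loop succeeds iff h is a sub-multiset of temp.
theorem pvRemoveLoop_eq_true_iff (h : List Int) :
    ∀ temp : List Int, (pvRemoveLoop h temp = true ↔ ∀ x : Int, h.count x ≤ temp.count x) := by
  induction h with
  | nil => intro temp; simp [pvRemoveLoop]
  | cons v rest ih =>
    intro temp
    by_cases hv : v ∈ temp
    · rw [show pvRemoveLoop (v :: rest) temp = pvRemoveLoop rest (temp.erase v) by
        simp [pvRemoveLoop, PySem.List.remove?_eq_some_erase temp v hv]]
      rw [ih (temp.erase v)]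
      have hc : 1 ≤ temp.count v := List.count_pos_iff.mpr hv
      constructor
      · intro H x
        have := H x
        rw [List.count_erase] at this
        rw [List.count_cons]
        by_cases hx : v = x
        · subst hx; simp at this ⊢; omega
        · have hb : (v == x) = false := by simp [hx]
          simp [hb] at this ⊢; omega
      · intro H x
        have := H x
        rw [List.count_erase]
        rw [List.count_cons] at this
        by_cases hx : v = x
        · subst hx; simp at this ⊢; omega
        · have hb : (v == x) = false := by simp [hx]
          simp [hb] at this ⊢; omega
    · rw [show pvRemoveLoop (v :: rest) temp = false by
        simp [pvRemoveLoop, (PySem.List.remove?_eq_none_iff temp v).mpr hv]]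
      have hz : temp.count v = 0 := List.count_eq_zero.mpr hv
      simp only [Bool.false_eq_true, false_iff]
      intro H
      have := H v
      rw [List.count_cons_self, hz] at this
      omega

-- B's merge walk on sorted lists succeeds iff a is a sublist of b.
theorem pvMergeLoop_eq_true_iff (a : List Int) :
    ∀ b : List Int, a.Pairwise (· ≤ ·) → b.Pairwise (· ≤ ·) →
      (pvMergeLoop a b = true ↔ List.Sublist a b) := by
  induction a with
  | nil => intro b _ _; simp [pvMergeLoop, List.nil_sublist]
  | cons x a' ih =>
    intro b ha hb
    have hsplit : b.takeWhile (fun y => decide (y < x)) ++ b.dropWhile (fun y => decide (y < x)) = b :=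
      List.takeWhile_append_dropWhile
    have hp : ∀ e ∈ b.takeWhile (fun y => decide (y < x)), e < x := by
      intro e he
      simpa using List.mem_takeWhile_imp he
    have hax : ∀ e ∈ a', x ≤ e := (List.pairwise_cons.mp ha).1
    have ha' : a'.Pairwise (· ≤ ·) := (List.pairwise_cons.mp ha).2
    cases hd : b.dropWhile (fun y => decide (y < x)) with
    | nil =>
      rw [show pvMergeLoop (x :: a') b = false by simp [pvMergeLoop, hd]]
      simp only [Bool.false_eq_true, false_iff]
      intro hsub
      have hx : x ∈ b := hsub.subset (List.mem_cons_self)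
      rw [← hsplit, hd, List.append_nil] at hx
      exact absurd rfl (ne_of_lt (hp x hx))
    | cons y rest =>
      have hne : b.dropWhile (fun y => decide (y < x)) ≠ [] := by rw [hd]; simp
      have hyx : ¬ (y < x) := by
        have := List.head_dropWhile_not (fun y => decide (y < x)) hne
        rw [show (b.dropWhile (fun y => decide (y < x))).head hne = y by simp [hd]] at this
        simpa using this
      have hb' : (y :: rest).Pairwise (· ≤ ·) := by
        rw [← hd]; exact hb.sublist (List.dropWhile_sublist _)
      have hrest : rest.Pairwise (· ≤ ·) := (List.pairwise_cons.mp hb').2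
      have hyrest : ∀ e ∈ rest, y ≤ e := (List.pairwise_cons.mp hb').1
      by_cases hxy : y = x
      · subst hxy
        rw [show pvMergeLoop (y :: a') b = pvMergeLoop a' rest by simp [pvMergeLoop, hd]]
        rw [ih rest ha' hrest]
        constructor
        · intro hsub
          apply List.cons_sublist_cons.mpr hsub |>.trans
          rw [← hsplit, hd]
          exact List.sublist_append_right _ _
        · intro hsub
          rw [← hsplit] at hsub
          rcases List.sublist_append_iff.mp hsub with ⟨l1, l2, heq, h1, h2⟩
          rw [hd] at h2
          cases l1 with
          | cons e l1' =>
            have hep := h1.subset List.mem_cons_self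
            have helt : e < y := hp e hep
            have hem : e ∈ y :: a' := by rw [heq]; exact List.mem_append_left _ List.mem_cons_self
            rcases List.mem_cons.mp hem with rfl | hea
            · exact absurd helt (lt_irrefl _)
            · exact absurd helt (not_lt.mpr (hax e hea))
          | nil =>
            simp only [List.nil_append] at heq
            rw [← heq] at h2
            exact List.cons_sublist_cons.mp h2
      · have hxlty : x < y := lt_of_le_of_ne (not_lt.mp hyx) (fun h => hxy h.symm)
        rw [show pvMergeLoop (x :: a') b = false by simp [pvMergeLoop, hd, hxy]]
        simp only [Bool.false_eq_true, false_iff]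
        intro hsub
        have hx : x ∈ b := hsub.subset List.mem_cons_self
        rw [← hsplit, hd] at hx
        rcases List.mem_append.mp hx with hxp | hxd
        · exact absurd rfl (ne_of_lt (hp x hxp))
        · rcases List.mem_cons.mp hxd with rfl | hxr
          · exact absurd rfl (ne_of_lt hxlty)
          · exact absurd (hyrest x hxr) (not_le.mpr hxlty)

-- ===== VERDICT (by name: the statement is the Claim_ definition above) =====
theorem check_h_sibof_l_spec : Claim_equal_check_h_sibof_l := by
  intro h_id l_id _
  unfold Spec_check_h_sibof_l check_h_sibof_l check_h_sibof_l_alt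
  split
  · rfl
  · rw [Bool.eq_iff_iff]
    rw [pvRemoveLoop_eq_true_iff,
        pvMergeLoop_eq_true_iff _ _
          (PySem.List.sorted_pairwise h_id (fun x => x))
          (PySem.List.sorted_pairwise l_id (fun x => x))]
    have ph := PySem.List.sorted_perm h_id (fun x : Int => x) false
    have pl := PySem.List.sorted_perm l_id (fun x : Int => x) false
    constructor
    · intro H
      apply List.sublist_of_subperm_of_pairwise
        (List.subperm_ext_iff.mpr (fun x _ => by rw [ph.count_eq, pl.count_eq]; exact H x))
        (PySem.List.sorted_pairwise h_id (fun x => x))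
        (PySem.List.sorted_pairwise l_id (fun x => x))
    · intro hsub x
      rw [← ph.count_eq, ← pl.count_eq]
      exact hsub.count_le x
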